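-- pv_equiv track=rewrite | github.com/oittaa/pseudoprimes-py | src/pseudoprimes/lucas.py | _lucas_sequence
-- ===== SOURCE A (Python) =====
-- from typing import Tuple
--
-- def _lucas_sequence(  # noqa: C901
--     n: int, P: int, Q: int, k: int
-- ) -> Tuple[int, int, int]:
--     """
--     Return the modular Lucas sequence (U_k, V_k, Q_k).
--     Given a Lucas sequence defined by P, Q, returns the kth values for
--     U and V, along with Q^k, all modulo n.  This is intended for use with
--     possibly very large values of n and k, where the combinatorial functions
--     would be completely unusable.
--     The modular Lucas sequences are used in numerous places in number theory,
--     especially in the Lucas compositeness tests and the various n + 1 proofs.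
--     """
--     D = P * P - 4 * Q
--     if n < 2:
--         raise ValueError("n must be >= 2")
--     if k < 0:
--         raise ValueError("k must be >= 0")
--     if D == 0:
--         raise ValueError("D must not be zero")
--
--     if k == 0:
--         return (0, 2, Q)
--     U = 1
--     V = P
--     Qk = Q
--     b = k.bit_length()
--     if Q == 1:
--         # Optimization for extra strong tests.
--         while b > 1:
--             U = (U * V) % n
--             V = (V * V - 2) % n
--             b -= 1
--             if (k >> (b - 1)) & 1:
--                 U, V = U * P + V, V * P + U * D
--                 if U & 1:
--                     U += n
--                 if V & 1:
--                     V += n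
--                 U, V = U >> 1, V >> 1
--     elif P == 1 and Q == -1:
--         # Small optimization for 50% of Selfridge parameters.
--         while b > 1:
--             U = (U * V) % n
--             if Qk == 1:
--                 V = (V * V - 2) % n
--             else:
--                 V = (V * V + 2) % n
--                 Qk = 1
--             b -= 1
--             if (k >> (b - 1)) & 1:
--                 U, V = U + V, V + U * D
--                 if U & 1:
--                     U += n
--                 if V & 1:
--                     V += n
--                 U, V = U >> 1, V >> 1
--                 Qk = -1
--     else:
--         # The general case with any P and Q.
--         while b > 1:
--             U = (U * V) % n
--             V = (V * V - 2 * Qk) % n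
--             Qk *= Qk
--             b -= 1
--             if (k >> (b - 1)) & 1:
--                 U, V = U * P + V, V * P + U * D
--                 if U & 1:
--                     U += n
--                 if V & 1:
--                     V += n
--                 U, V = U >> 1, V >> 1
--                 Qk *= Q
--             Qk %= n
--     return (U % n, V % n, Qk)
-- ===== SOURCE B (Python) =====
-- def _lucas_sequence(n, P, Q, k):
--     """
--     Modular Lucas sequence (U_k, V_k, Q^k) mod n, as a single unified
--     binary ladder written as structural recursion on k (no special-case
--     branches for Q == 1 or P == 1, Q == -1).
--     """
--     D = P * P - 4 * Q
--     if n < 2: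
--         raise ValueError("n must be >= 2")
--     if k < 0:
--         raise ValueError("k must be >= 0")
--     if D == 0:
--         raise ValueError("D must not be zero")
--     if k == 0:
--         return (0, 2, Q)
--
--     def lucas(m):
--         # (U_m, V_m, Q^m) for the binary prefix m of k.
--         if m == 1:
--             return (1, P, Q)
--         U, V, Qk = lucas(m >> 1)
--         U = (U * V) % n
--         V = (V * V - 2 * Qk) % n
--         Qk = Qk * Qk
--         if m & 1:
--             U, V = U * P + V, V * P + U * D
--             if U & 1:
--                 U += n
--             if V & 1:
--                 V += n
--             U, V, Qk = U >> 1, V >> 1, Qk * Q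
--         Qk %= n
--         return (U, V, Qk)
--
--     U, V, Qk = lucas(k)
--     return (U % n, V % n, Qk)
-- ===== Notes on version B (the rewrite author's own statement) =====
-- stated objective: simpler
-- what changed: B collapses A's three specialised doubling branches (Q==1, P==1&Q==-1, general) into one unified general ladder step and runs it as structural recursion on k's binary prefixes instead of A's bit-length-indexed while loop, tracking Q^k reduced mod n throughout.
-- intended difference: On Selfridge parameters P=1, Q=-1 with odd k>=3, A returns -1 (its internal sign flag) as the third component although the docstring promises Q^k modulo n; B returns the reduced residue n-1, the intended value. — e.g. on _lucas_sequence(5, 1, -1, 3): A returns (2, 4, -1), B returns (2, 4, 4)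
import Mathlib
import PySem

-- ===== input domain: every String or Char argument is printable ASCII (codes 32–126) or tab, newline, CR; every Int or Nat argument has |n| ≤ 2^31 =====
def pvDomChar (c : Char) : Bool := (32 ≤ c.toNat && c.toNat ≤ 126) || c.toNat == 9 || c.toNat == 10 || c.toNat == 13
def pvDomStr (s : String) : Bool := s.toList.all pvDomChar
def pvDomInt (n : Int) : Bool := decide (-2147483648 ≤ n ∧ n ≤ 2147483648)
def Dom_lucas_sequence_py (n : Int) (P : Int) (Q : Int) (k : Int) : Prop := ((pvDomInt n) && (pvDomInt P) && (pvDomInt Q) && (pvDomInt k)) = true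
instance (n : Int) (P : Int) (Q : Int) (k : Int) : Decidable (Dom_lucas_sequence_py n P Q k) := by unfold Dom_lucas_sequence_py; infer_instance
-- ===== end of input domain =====

-- B replaces A's three specialised doubling branches by one unified binary ladder written as
-- structural recursion on k (objective: simpler); same returned triple except the stated D_ corner.

-- ===== PORT A =====
-- A's `while b > 1` loop, one def per branch; the counter b is the Nat argument, k's bits are
-- read from kn = k.toNat (k ≥ 0 whenever the loop is reached).  `%` is PySem.Int.mod,
-- `x >> 1` is `x >>> (1:Nat)`, `x & 1` is PySem.Int.band x 1 (Python-exact on negatives).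

-- branch `Q == 1` (Qk is never reassigned there, so the state is just (U, V))
def pvLoopQ1 (n P D : Int) (kn : Nat) : Nat → Int × Int → Int × Int
  | 0, s => s
  | 1, s => s
  | b + 2, (U, V) =>
    let U := PySem.Int.mod (U * V) n
    let V := PySem.Int.mod (V * V - 2) n
    let s :=
      if (kn >>> b) &&& 1 = 1 then
        let U2 := U * P + V
        let V2 := V * P + U * D
        let U2 := if PySem.Int.band U2 1 ≠ 0 then U2 + n else U2
        let V2 := if PySem.Int.band V2 1 ≠ 0 then V2 + n else V2
        (U2 >>> (1 : Nat), V2 >>> (1 : Nat))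
      else (U, V)
    pvLoopQ1 n P D kn (b + 1) s

-- branch `P == 1 and Q == -1`
def pvLoopS (n D : Int) (kn : Nat) : Nat → Int × Int × Int → Int × Int × Int
  | 0, s => s
  | 1, s => s
  | b + 2, (U, V, Qk) =>
    let U := PySem.Int.mod (U * V) n
    let (V, Qk) :=
      if Qk = 1 then (PySem.Int.mod (V * V - 2) n, Qk)
      else (PySem.Int.mod (V * V + 2) n, (1 : Int))
    let s :=
      if (kn >>> b) &&& 1 = 1 then
        let U2 := U + V
        let V2 := V + U * D
        let U2 := if PySem.Int.band U2 1 ≠ 0 then U2 + n else U2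
        let V2 := if PySem.Int.band V2 1 ≠ 0 then V2 + n else V2
        (U2 >>> (1 : Nat), V2 >>> (1 : Nat), (-1 : Int))
      else (U, V, Qk)
    pvLoopS n D kn (b + 1) s

-- the general branch
def pvLoopG (n P Q D : Int) (kn : Nat) : Nat → Int × Int × Int → Int × Int × Int
  | 0, s => s
  | 1, s => s
  | b + 2, (U, V, Qk) =>
    let U := PySem.Int.mod (U * V) n
    let V := PySem.Int.mod (V * V - 2 * Qk) n
    let Qk := Qk * Qk
    let (U, V, Qk) :=
      if (kn >>> b) &&& 1 = 1 then
        let U2 := U * P + V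
        let V2 := V * P + U * D
        let U2 := if PySem.Int.band U2 1 ≠ 0 then U2 + n else U2
        let V2 := if PySem.Int.band V2 1 ≠ 0 then V2 + n else V2
        (U2 >>> (1 : Nat), V2 >>> (1 : Nat), Qk * Q)
      else (U, V, Qk)
    pvLoopG n P Q D kn (b + 1) (U, V, PySem.Int.mod Qk n)

-- where Python raises ValueError (n < 2, k < 0, D = 0) the port returns (0, 0, 0); Pre_ excludes those inputs
def lucas_sequence_py (n : Int) (P : Int) (Q : Int) (k : Int) : Int × Int × Int :=
  let D := P * P - 4 * Q
  if n < 2 then (0, 0, 0)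
  else if k < 0 then (0, 0, 0)
  else if D = 0 then (0, 0, 0)
  else if k = 0 then (0, 2, Q)
  else
    let kn := k.toNat
    let b := PySem.Int.bitLength k
    if Q = 1 then
      let (U, V) := pvLoopQ1 n P D kn b (1, P)
      (PySem.Int.mod U n, PySem.Int.mod V n, Q)
    else if P = 1 ∧ Q = -1 then
      let (U, V, Qk) := pvLoopS n D kn b (1, P, Q)
      (PySem.Int.mod U n, PySem.Int.mod V n, Qk)
    else
      let (U, V, Qk) := pvLoopG n P Q D kn b (1, P, Q)
      (PySem.Int.mod U n, PySem.Int.mod V n, Qk)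

-- ===== PORT B =====
-- Source B's inner `lucas(m)`: recursion on the binary prefix m of k (recurse on m >> 1).  The extra
-- fuel argument (called with fuel = m ≥ recursion depth) only makes the recursion structural;
-- it never changes the computed value.
def pvLucasAlt (n P Q D : Int) : Nat → Nat → Int × Int × Int
  | 0, _ => (1, P, Q)
  | fuel + 1, m =>
    if m ≤ 1 then (1, P, Q)
    else
      let (U, V, Qk) := pvLucasAlt n P Q D fuel (m >>> 1)
      let U := PySem.Int.mod (U * V) n
      let V := PySem.Int.mod (V * V - 2 * Qk) n
      let Qk := Qk * Qk
      let (U, V, Qk) :=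
        if m &&& 1 = 1 then
          let U2 := U * P + V
          let V2 := V * P + U * D
          let U2 := if PySem.Int.band U2 1 ≠ 0 then U2 + n else U2
          let V2 := if PySem.Int.band V2 1 ≠ 0 then V2 + n else V2
          (U2 >>> (1 : Nat), V2 >>> (1 : Nat), Qk * Q)
        else (U, V, Qk)
      (U, V, PySem.Int.mod Qk n)

def lucas_sequence_py_alt (n : Int) (P : Int) (Q : Int) (k : Int) : Int × Int × Int :=
  let D := P * P - 4 * Q
  if n < 2 then (0, 0, 0)
  else if k < 0 then (0, 0, 0)
  else if D = 0 then (0, 0, 0)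
  else if k = 0 then (0, 2, Q)
  else
    let (U, V, Qk) := pvLucasAlt n P Q D k.toNat k.toNat
    (PySem.Int.mod U n, PySem.Int.mod V n, Qk)

-- ===== PRECONDITION & SPEC =====
-- Pre_ excludes exactly the ValueError guards of A: n < 2, k < 0, or D = P*P - 4*Q = 0
def Pre_lucas_sequence_py (n : Int) (P : Int) (Q : Int) (k : Int) : Prop :=
  2 ≤ n ∧ 0 ≤ k ∧ P * P - 4 * Q ≠ 0
instance (n : Int) (P : Int) (Q : Int) (k : Int) : Decidable (Pre_lucas_sequence_py n P Q k) := by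
  unfold Pre_lucas_sequence_py; infer_instance

def pvWitness_lucas_sequence_py : Int × Int × Int × Int := (5, 3, 1, 4)

-- On Selfridge parameters P = 1, Q = -1 with odd k ≥ 3, A returns -1 (its internal sign flag) as the
-- third component although the docstring promises "Q^k … modulo n"; B returns the reduced residue n - 1,
-- which is the intended value.
def D_lucas_sequence_py (n : Int) (P : Int) (Q : Int) (k : Int) : Prop :=
  P = 1 ∧ Q = -1 ∧ k % 2 = 1 ∧ 3 ≤ k
instance (n : Int) (P : Int) (Q : Int) (k : Int) : Decidable (D_lucas_sequence_py n P Q k) := by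
  unfold D_lucas_sequence_py; infer_instance

def Spec_lucas_sequence_py (n : Int) (P : Int) (Q : Int) (k : Int) (out : Int × Int × Int) : Prop :=
  ¬ D_lucas_sequence_py n P Q k → out = lucas_sequence_py_alt n P Q k
instance (n : Int) (P : Int) (Q : Int) (k : Int) (out : Int × Int × Int) : Decidable (Spec_lucas_sequence_py n P Q k out) := by
  unfold Spec_lucas_sequence_py; infer_instance

def pvDiffWitness_lucas_sequence_py : Int × Int × Int × Int := (5, 1, -1, 3)
def pvDiffWitnessOut_lucas_sequence_py : (Int × Int × Int) × (Int × Int × Int) := ((2, 4, -1), (2, 4, 4))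

-- ===== CLAIM (what is proved, stated in full; the proofs are below) =====
def Claim_unchanged_lucas_sequence_py : Prop := ∀ (n : Int) (P : Int) (Q : Int) (k : Int), Dom_lucas_sequence_py n P Q k → Pre_lucas_sequence_py n P Q k → Spec_lucas_sequence_py n P Q k (lucas_sequence_py n P Q k)
def Claim_changed_lucas_sequence_py : Prop := Dom_lucas_sequence_py (pvDiffWitness_lucas_sequence_py.1) (pvDiffWitness_lucas_sequence_py.2.1) (pvDiffWitness_lucas_sequence_py.2.2.1) (pvDiffWitness_lucas_sequence_py.2.2.2) ∧ Pre_lucas_sequence_py (pvDiffWitness_lucas_sequence_py.1) (pvDiffWitness_lucas_sequence_py.2.1) (pvDiffWitness_lucas_sequence_py.2.2.1) (pvDiffWitness_lucas_sequence_py.2.2.2) ∧ D_lucas_sequence_py (pvDiffWitness_lucas_sequence_py.1) (pvDiffWitness_lucas_sequence_py.2.1) (pvDiffWitness_lucas_sequence_py.2.2.1) (pvDiffWitness_lucas_sequence_py.2.2.2) ∧ lucas_sequence_py (pvDiffWitness_lucas_sequence_py.1) (pvDiffWitness_lucas_sequence_py.2.1) (pvDiffWitness_lucas_sequence_py.2.2.1)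 (pvDiffWitness_lucas_sequence_py.2.2.2) = pvDiffWitnessOut_lucas_sequence_py.1 ∧ lucas_sequence_py_alt (pvDiffWitness_lucas_sequence_py.1) (pvDiffWitness_lucas_sequence_py.2.1) (pvDiffWitness_lucas_sequence_py.2.2.1) (pvDiffWitness_lucas_sequence_py.2.2.2) = pvDiffWitnessOut_lucas_sequence_py.2 ∧ pvDiffWitnessOut_lucas_sequence_py.1 ≠ pvDiffWitnessOut_lucas_sequence_py.2
def Claim_exact_lucas_sequence_py : Prop := ∀ (n : Int) (P : Int) (Q : Int) (k : Int), Dom_lucas_sequence_py n P Q k → Pre_lucas_sequence_py n P Q k → D_lucas_sequence_py n P Q k → lucas_sequence_py n P Q k ≠ lucas_sequence_py_alt n P Q k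

-- ===== LEMMAS AND PROOFS =====

-- the one general ladder step (squaring, optional odd-bit addition step, final Qk %= n)
def pvStepG (n P Q D : Int) (bit : Bool) : Int × Int × Int → Int × Int × Int
  | (U, V, Qk) =>
    let U := PySem.Int.mod (U * V) n
    let V := PySem.Int.mod (V * V - 2 * Qk) n
    let Qk := Qk * Qk
    let (U, V, Qk) :=
      if bit then
        let U2 := U * P + V
        let V2 := V * P + U * D
        let U2 := if PySem.Int.band U2 1 ≠ 0 then U2 + n else U2
        let V2 := if PySem.Int.band V2 1 ≠ 0 then V2 + n else V2
        (U2 >>> (1 : Nat), V2 >>> (1 : Nat), Qk * Q)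
      else (U, V, Qk)
    (U, V, PySem.Int.mod Qk n)

-- the Selfridge (P = 1, Q = -1) step of A
def pvStepS (n D : Int) (bit : Bool) : Int × Int × Int → Int × Int × Int
  | (U, V, Qk) =>
    let U := PySem.Int.mod (U * V) n
    let (V, Qk) :=
      if Qk = 1 then (PySem.Int.mod (V * V - 2) n, Qk)
      else (PySem.Int.mod (V * V + 2) n, (1 : Int))
    if bit then
      let U2 := U + V
      let V2 := V + U * D
      let U2 := if PySem.Int.band U2 1 ≠ 0 then U2 + n else U2
      let V2 := if PySem.Int.band V2 1 ≠ 0 then V2 + n else V2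
      (U2 >>> (1 : Nat), V2 >>> (1 : Nat), (-1 : Int))
    else (U, V, Qk)

theorem pvLoopG_iter (n P Q D : Int) (kn b : Nat) (s : Int × Int × Int) :
    pvLoopG n P Q D kn (b + 2) s
      = pvLoopG n P Q D kn (b + 1) (pvStepG n P Q D (decide ((kn >>> b) &&& 1 = 1)) s) := by
  rcases s with ⟨U, V, Qk⟩
  simp only [pvLoopG, pvStepG, decide_eq_true_eq]

theorem pvLoopS_iter (n D : Int) (kn b : Nat) (s : Int × Int × Int) :
    pvLoopS n D kn (b + 2) s
      = pvLoopS n D kn (b + 1) (pvStepS n D (decide ((kn >>> b) &&& 1 = 1)) s) := by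
  rcases s with ⟨U, V, Qk⟩
  simp only [pvLoopS, pvStepS, decide_eq_true_eq]

theorem pvLoopG_peel (n P Q D : Int) (b : Nat) :
    ∀ (kn : Nat) (s : Int × Int × Int),
      pvLoopG n P Q D kn (b + 2) s
        = pvStepG n P Q D (decide (kn &&& 1 = 1)) (pvLoopG n P Q D (kn >>> 1) (b + 1) s) := by
  induction b with
  | zero =>
    intro kn s
    rw [pvLoopG_iter]
    simp [pvLoopG]
  | succ b ih =>
    intro kn s
    rw [pvLoopG_iter, ih, pvLoopG_iter]
    have hb : (kn >>> 1) >>> b = kn >>> (b + 1) := by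
      rw [Nat.add_comm, Nat.shiftRight_add]
    rw [hb]

theorem pvLucasAlt_eq (n P Q D : Int) (fuel m : Nat) (hm : 2 ≤ m) :
    pvLucasAlt n P Q D (fuel + 1) m
      = pvStepG n P Q D (decide (m &&& 1 = 1)) (pvLucasAlt n P Q D fuel (m >>> 1)) := by
  rcases h : pvLucasAlt n P Q D fuel (m >>> 1) with ⟨U, V, Qk⟩
  simp only [pvLucasAlt, pvStepG, h, decide_eq_true_eq, if_neg (show ¬ m ≤ 1 by omega)]

theorem pvBitLen_succ (m : Nat) (hm : 1 ≤ m) :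
    PySem.Int.bitLength (m : Int) = PySem.Int.bitLength ((m >>> 1 : Nat) : Int) + 1 := by
  have h := PySem.Int.bitLength_natCast (m := m) (by omega)
  simpa [Nat.shiftRight_eq_div_pow] using h

theorem pvBitLen_pos (m : Nat) (hm : 1 ≤ m) : 1 ≤ PySem.Int.bitLength (m : Int) := by
  rw [pvBitLen_succ m hm]; omega

-- A's MSB-first counted loop computes exactly B's structural recursion on the prefix
theorem pvLoopG_eq_alt (n P Q D : Int) :
    ∀ (m : Nat), 1 ≤ m → ∀ (fuel : Nat), m ≤ fuel →
      pvLoopG n P Q D m (PySem.Int.bitLength (m : Int)) (1, P, Q) = pvLucasAlt n P Q D fuel m := by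
  intro m
  induction m using Nat.strong_induction_on with
  | _ m ih =>
    intro hm fuel hfuel
    match fuel with
    | 0 => omega
    | f + 1 =>
      by_cases h2 : m ≤ 1
      · have : m = 1 := by omega
        subst this
        simp [pvLucasAlt, pvLoopG, show PySem.Int.bitLength (1 : Int) = 1 from by decide]
      · have hm2 : 2 ≤ m := by omega
        have hhalf : 1 ≤ m >>> 1 := by
          simp only [Nat.shiftRight_eq_div_pow, pow_one]; omega
        have hlt : m >>> 1 < m := by
          simpa [Nat.shiftRight_eq_div_pow] using Nat.div_lt_self (by omega) (by omega)
        have hbl1 := pvBitLen_pos (m >>> 1) hhalf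
        rw [pvLucasAlt_eq n P Q D f m hm2,
          ← ih (m >>> 1) hlt hhalf f (by omega),
          pvBitLen_succ m (by omega),
          show PySem.Int.bitLength ((m >>> 1 : Nat) : Int) + 1
              = (PySem.Int.bitLength ((m >>> 1 : Nat) : Int) - 1) + 2 from by omega,
          pvLoopG_peel,
          show (PySem.Int.bitLength ((m >>> 1 : Nat) : Int) - 1) + 1
              = PySem.Int.bitLength ((m >>> 1 : Nat) : Int) from by omega]

theorem pvModOne (n : Int) (hn : 2 ≤ n) : PySem.Int.mod 1 n = 1 := by
  rw [PySem.Int.mod_eq_emod_of_pos (by omega)]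
  exact Int.emod_eq_of_lt (by norm_num) (by omega)

theorem pvModNegOne (n : Int) (hn : 2 ≤ n) : PySem.Int.mod (-1) n = n - 1 := by
  rw [PySem.Int.mod_eq_emod_of_pos (by omega),
    show (-1 : Int) = (n - 1) + n * (-1) from by ring,
    Int.add_mul_emod_self_left]
  exact Int.emod_eq_of_lt (by omega) (by omega)

-- the Q = 1 branch is the general step with the Qk component frozen at 1
theorem pvLoopQ1_eq_loopG (n P D : Int) (hn : 2 ≤ n) (kn : Nat) :
    ∀ (b : Nat) (U V : Int),
      pvLoopG n P 1 D kn b (U, V, 1)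
        = ((pvLoopQ1 n P D kn b (U, V)).1, (pvLoopQ1 n P D kn b (U, V)).2, 1) := by
  intro b
  induction b using Nat.strong_induction_on with
  | _ b ih =>
    intro U V
    match b with
    | 0 => simp [pvLoopG, pvLoopQ1]
    | 1 => simp [pvLoopG, pvLoopQ1]
    | b + 2 =>
      by_cases hbit : (kn >>> b) &&& 1 = 1
      · simp only [pvLoopG, pvLoopQ1, if_pos hbit, mul_one, one_mul, pvModOne n hn]
        exact ih (b + 1) (by omega) _ _
      · simp only [pvLoopG, pvLoopQ1, if_neg hbit, mul_one, one_mul, pvModOne n hn]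
        exact ih (b + 1) (by omega) _ _

-- one Selfridge iteration against one general iteration (P = 1, Q = -1)
theorem pvStepS_eq_stepG (n D : Int) (hn : 2 ≤ n) (bit : Bool) (U V q2 qg : Int)
    (hq2 : q2 = 1 ∨ q2 = -1) (hc : PySem.Int.mod qg n = PySem.Int.mod q2 n) :
    ∃ U' V',
      pvStepS n D bit (U, V, q2) = (U', V', if bit then (-1 : Int) else 1)
        ∧ pvStepG n 1 (-1) D bit (U, V, qg) = (U', V', if bit then n - 1 else 1) := by
  have hpos : (0 : Int) < n := by omega
  rw [PySem.Int.mod_eq_emod_of_pos hpos, PySem.Int.mod_eq_emod_of_pos hpos] at hc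
  have hcm : Int.ModEq n qg q2 := hc
  have hq1 : qg * qg ≡ 1 [ZMOD n] := by
    have h := hcm.mul hcm
    rcases hq2 with h2 | h2 <;> subst h2 <;> simpa using h
  have hQeven : PySem.Int.mod (qg * qg) n = 1 := by
    rw [PySem.Int.mod_eq_emod_of_pos hpos]
    have h1 : (1 : Int) % n = 1 := Int.emod_eq_of_lt (by norm_num) (by omega)
    calc qg * qg % n = 1 % n := hq1
    _ = 1 := h1
  have hQodd : PySem.Int.mod (qg * qg * -1) n = n - 1 := by
    have h : qg * qg * -1 ≡ -1 [ZMOD n] := by simpa using hq1.mul_right (-1)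
    rw [PySem.Int.mod_eq_emod_of_pos hpos]
    calc qg * qg * -1 % n = (-1) % n := h
    _ = n - 1 := by rw [← PySem.Int.mod_eq_emod_of_pos hpos]; exact pvModNegOne n hn
  have hQodd' : PySem.Int.mod (-(qg * qg)) n = n - 1 := by
    rw [show -(qg * qg) = qg * qg * -1 from by ring]; exact hQodd
  rcases hq2 with h2 | h2 <;> subst h2
  · -- q2 = 1
    have hV : PySem.Int.mod (V * V - 2 * qg) n = PySem.Int.mod (V * V - 2) n := by
      have h : Int.ModEq n (V * V - 2 * qg) (V * V - 2 * 1) :=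
        (Int.ModEq.refl _).sub (Int.ModEq.mul_left 2 hcm)
      rw [PySem.Int.mod_eq_emod_of_pos hpos, PySem.Int.mod_eq_emod_of_pos hpos]
      simpa using h
    cases bit with
    | false =>
      refine ⟨(pvStepS n D false (U, V, 1)).1, (pvStepS n D false (U, V, 1)).2.1, ?_, ?_⟩ <;>
        simp [pvStepS, pvStepG, hV, hQeven, hQodd']
    | true =>
      refine ⟨(pvStepS n D true (U, V, 1)).1, (pvStepS n D true (U, V, 1)).2.1, ?_, ?_⟩ <;>
        simp [pvStepS, pvStepG, hV, hQeven, hQodd']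
  · -- q2 = -1
    have hV : PySem.Int.mod (V * V - 2 * qg) n = PySem.Int.mod (V * V + 2) n := by
      have h : Int.ModEq n (V * V - 2 * qg) (V * V - 2 * (-1)) :=
        (Int.ModEq.refl _).sub (Int.ModEq.mul_left 2 hcm)
      rw [PySem.Int.mod_eq_emod_of_pos hpos, PySem.Int.mod_eq_emod_of_pos hpos]
      have h' : V * V - 2 * (-1) = V * V + 2 := by ring
      rw [← h']
      exact h
    cases bit with
    | false =>
      refine ⟨(pvStepS n D false (U, V, -1)).1, (pvStepS n D false (U, V, -1)).2.1, ?_, ?_⟩ <;>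
        simp [pvStepS, pvStepG, hV, hQeven, hQodd']
    | true =>
      refine ⟨(pvStepS n D true (U, V, -1)).1, (pvStepS n D true (U, V, -1)).2.1, ?_, ?_⟩ <;>
        simp [pvStepS, pvStepG, hV, hQeven, hQodd']

-- A's Selfridge loop against the general loop, with the exact final Qk values
theorem pvLoopS_eq_loopG (n D : Int) (hn : 2 ≤ n) (kn : Nat) :
    ∀ (b : Nat) (U V q2 qg : Int), (q2 = 1 ∨ q2 = -1) →
      PySem.Int.mod qg n = PySem.Int.mod q2 n →
      ∃ U' V',
        pvLoopS n D kn (b + 2) (U, V, q2)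
          = (U', V', if kn &&& 1 = 1 then (-1 : Int) else 1)
          ∧ pvLoopG n 1 (-1) D kn (b + 2) (U, V, qg)
          = (U', V', if kn &&& 1 = 1 then n - 1 else 1) := by
  intro b
  induction b with
  | zero =>
    intro U V q2 qg hq2 hc
    obtain ⟨U', V', hS, hG⟩ :=
      pvStepS_eq_stepG n D hn (decide ((kn >>> 0) &&& 1 = 1)) U V q2 qg hq2 hc
    refine ⟨U', V', ?_, ?_⟩
    · rw [pvLoopS_iter, hS]
      by_cases h : kn &&& 1 = 1 <;> simp [pvLoopS, h]
    · rw [pvLoopG_iter, hG]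
      by_cases h : kn &&& 1 = 1 <;> simp [pvLoopG, h]
  | succ b ih =>
    intro U V q2 qg hq2 hc
    obtain ⟨U', V', hS, hG⟩ :=
      pvStepS_eq_stepG n D hn (decide ((kn >>> (b + 1)) &&& 1 = 1)) U V q2 qg hq2 hc
    rw [show b + 1 + 2 = (b + 1) + 2 from rfl, pvLoopS_iter, pvLoopG_iter, hS, hG]
    by_cases h : (kn >>> (b + 1)) &&& 1 = 1
    · simp only [h, decide_true, if_pos]
      exact ih U' V' (-1) (n - 1) (Or.inr rfl)
        (by rw [pvModNegOne n hn, PySem.Int.mod_eq_emod_of_pos (by omega)]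
            exact Int.emod_eq_of_lt (by omega) (by omega))
    · simp only [h, decide_false]
      exact ih U' V' 1 1 (Or.inl rfl) rfl

theorem pvBand_one_mod (kn : Nat) : kn &&& 1 = kn % 2 := Nat.and_one_is_mod kn

-- ===== VERDICT (by name: the statement is the Claim_ definition above) =====
theorem lucas_sequence_py_spec : Claim_unchanged_lucas_sequence_py := by
  intro n P Q k hdom hpre hnd
  obtain ⟨hn, hk, hD⟩ := hpre
  show lucas_sequence_py n P Q k = lucas_sequence_py_alt n P Q k
  by_cases hk0 : k = 0
  · subst hk0
    simp [lucas_sequence_py, lucas_sequence_py_alt, hD]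
  · have hk1 : 1 ≤ k := by omega
    have hkn : k = ((k.toNat : Nat) : Int) := (Int.toNat_of_nonneg hk).symm
    have hkn1 : 1 ≤ k.toNat := by omega
    simp only [lucas_sequence_py, lucas_sequence_py_alt,
      if_neg (show ¬ n < 2 by omega), if_neg (show ¬ k < 0 by omega), if_neg hD,
      if_neg hk0]
    have hbl : PySem.Int.bitLength k = PySem.Int.bitLength ((k.toNat : Nat) : Int) := by
      rw [← hkn]
    by_cases hQ1 : Q = 1
    · subst hQ1
      rw [if_pos rfl]
      rw [hbl, ← pvLoopG_eq_alt n P 1 (P * P - 4 * 1) k.toNat hkn1 k.toNat le_rfl,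
        pvLoopQ1_eq_loopG n P (P * P - 4 * 1) hn k.toNat]
    · rw [if_neg hQ1]
      by_cases hS : P = 1 ∧ Q = -1
      · rw [if_pos hS]
        obtain ⟨hP, hQ⟩ := hS
        subst hP; subst hQ
        rw [hbl, ← pvLoopG_eq_alt n 1 (-1) (1 * 1 - 4 * -1) k.toNat hkn1 k.toNat le_rfl]
        by_cases hk2 : k.toNat ≤ 1
        · have h1 : k.toNat = 1 := by omega
          rw [h1, show PySem.Int.bitLength ((1 : Nat) : Int) = 1 from by decide]
          simp [pvLoopS, pvLoopG]
        · -- k ≥ 2 and ¬ D_ forces k even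
          have hkeven : k % 2 = 0 := by
            rcases Int.emod_two_eq k with h | h
            · exact h
            · exact absurd ⟨rfl, rfl, h, by omega⟩ hnd
          have hknE : k.toNat % 2 = 0 := by omega
          have hbl2 : 2 ≤ PySem.Int.bitLength ((k.toNat : Nat) : Int) := by
            have h1 := pvBitLen_succ k.toNat (by omega)
            have h2 : 1 ≤ k.toNat >>> 1 := by
              simp only [Nat.shiftRight_eq_div_pow, pow_one]; omega
            have := pvBitLen_pos (k.toNat >>> 1) h2
            omega
          rw [show PySem.Int.bitLength ((k.toNat : Nat) : Int)
              = (PySem.Int.bitLength ((k.toNat : Nat) : Int) - 2) + 2 from by omega]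
          obtain ⟨U', V', hS', hG'⟩ :=
            pvLoopS_eq_loopG n (1 * 1 - 4 * -1) hn k.toNat
              (PySem.Int.bitLength ((k.toNat : Nat) : Int) - 2) 1 1 (-1) (-1)
              (Or.inr rfl) rfl
          have hb0 : ¬ (k.toNat &&& 1 = 1) := by rw [pvBand_one_mod]; omega
          rw [hS', hG', if_neg hb0, if_neg hb0]
      · rw [if_neg hS]
        rw [hbl, ← pvLoopG_eq_alt n P Q (P * P - 4 * Q) k.toNat hkn1 k.toNat le_rfl]

theorem lucas_sequence_py_changed : Claim_changed_lucas_sequence_py := by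
  unfold Claim_changed_lucas_sequence_py; decide

theorem lucas_sequence_py_tight : Claim_exact_lucas_sequence_py := by
  intro n P Q k hdom hpre hd
  obtain ⟨hn, hk, hDne⟩ := hpre
  obtain ⟨hP, hQ, hodd, hk3⟩ := hd
  have hkn : k = ((k.toNat : Nat) : Int) := (Int.toNat_of_nonneg hk).symm
  have hkn1 : 1 ≤ k.toNat := by omega
  have hbl : PySem.Int.bitLength k = PySem.Int.bitLength ((k.toNat : Nat) : Int) := by
    rw [← hkn]
  simp only [lucas_sequence_py, lucas_sequence_py_alt,
    if_neg (show ¬ n < 2 by omega), if_neg (show ¬ k < 0 by omega), if_neg hDne,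
    if_neg (show ¬ k = 0 by omega)]
  rw [if_neg (show ¬ Q = 1 from by rw [hQ]; norm_num), if_pos (⟨hP, hQ⟩ : P = 1 ∧ Q = -1)]
  subst hP; subst hQ
  rw [hbl, ← pvLoopG_eq_alt n 1 (-1) (1 * 1 - 4 * -1) k.toNat hkn1 k.toNat le_rfl]
  have hbl2 : 2 ≤ PySem.Int.bitLength ((k.toNat : Nat) : Int) := by
    have h1 := pvBitLen_succ k.toNat (by omega)
    have h2 : 1 ≤ k.toNat >>> 1 := by
      simp only [Nat.shiftRight_eq_div_pow, pow_one]; omega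
    have := pvBitLen_pos (k.toNat >>> 1) h2
    omega
  rw [show PySem.Int.bitLength ((k.toNat : Nat) : Int)
      = (PySem.Int.bitLength ((k.toNat : Nat) : Int) - 2) + 2 from by omega]
  obtain ⟨U', V', hS', hG'⟩ :=
    pvLoopS_eq_loopG n (1 * 1 - 4 * -1) hn k.toNat
      (PySem.Int.bitLength ((k.toNat : Nat) : Int) - 2) 1 1 (-1) (-1)
      (Or.inr rfl) rfl
  have hb1 : k.toNat &&& 1 = 1 := by rw [pvBand_one_mod]; omega
  rw [hS', hG', if_pos hb1, if_pos hb1]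
  intro hcontra
  have h3 := congrArg (fun t : Int × Int × Int => t.2.2) hcontra
  simp only at h3
  omega
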